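-- pv_equiv track=rewrite | github.com/WangXichang/omrlib-omrlib-tf | temp_barcode_128wid.py | seek_code
-- ===== SOURCE A (Python) =====
-- def seek_code(vec):
--     for j in range(len(vec)):
--         if vec[j] > 0:
--             vec = vec[j:]
--             break
--     for j in range(len(vec)-1, 0, -1):
--         if vec[j] > 0:
--             vec = vec[0:j]
--             break
--     widlist = []
--     cur = vec[0]
--     last = vec[0]
--     curwid = 1
--     for j in range(1, len(vec)):
--         cur = vec[j]
--         if cur == last:
--             curwid += 1
--         else:
--             widlist.append(curwid)
--             curwid = 1
--         last = cur
--     return widlist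
-- ===== SOURCE B (Python) =====
-- def seek_code(vec):
--     # trim: start at first positive element (whole vector if none)
--     start = next((i for i, x in enumerate(vec) if x > 0), 0)
--     vec = vec[start:]
--     # trim: cut just before the last positive element at index >= 1 (A's vec[0:j])
--     pos = [j for j in range(1, len(vec)) if vec[j] > 0]
--     if pos:
--         vec = vec[:pos[-1]]
--     # run widths via change-point indices: widths are the gaps between
--     # consecutive change points (the final run is never emitted)
--     cuts = [j for j in range(1, len(vec)) if vec[j] != vec[j - 1]]
--     return [b - a for a, b in zip([0] + cuts, cuts)]
-- ===== Notes on version B (the rewrite author's own statement) =====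
-- stated objective: alternative
-- what changed: Replaces A's three stateful scan loops (break-searches and a cur/last/curwid run-length accumulator) by index arithmetic: comprehensions collecting the positive and change-point indices, trimming via the last positive index, and run widths as gap differences of consecutive change points.
import Mathlib
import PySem

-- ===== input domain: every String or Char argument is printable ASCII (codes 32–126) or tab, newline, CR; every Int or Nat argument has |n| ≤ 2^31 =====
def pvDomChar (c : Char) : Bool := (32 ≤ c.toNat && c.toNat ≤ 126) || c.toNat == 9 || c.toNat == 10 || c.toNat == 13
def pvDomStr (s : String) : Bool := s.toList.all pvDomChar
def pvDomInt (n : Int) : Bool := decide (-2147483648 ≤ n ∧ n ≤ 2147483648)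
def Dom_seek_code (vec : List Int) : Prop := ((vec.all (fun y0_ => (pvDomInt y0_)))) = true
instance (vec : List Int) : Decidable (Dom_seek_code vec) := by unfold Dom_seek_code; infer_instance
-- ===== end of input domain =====

-- B replaces A's three stateful loops by index arithmetic: change-point lists and
-- gap differences (objective: alternative decomposition, same cost).

-- ===== PORT A =====
-- first loop of A: smallest j with vec[j] > 0 (None if no positive element)
def pvFindPosA (vec : List Int) (j : Nat) : Option Nat :=
  if _h : j < vec.length then
    (if 0 < vec.getD j 0 then some j else pvFindPosA vec (j + 1))
  else none
termination_by vec.length - j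

-- second loop of A: largest index in [1, j] with vec[index] > 0 (None if none)
def pvFindPosDownA (vec : List Int) (j : Nat) : Option Nat :=
  if j = 0 then none
  else if 0 < vec.getD j 0 then some j else pvFindPosDownA vec (j - 1)

-- A's code, step for step: two trimming searches (vec[j:] = drop j, vec[0:j] = take j,
-- both with 0 ≤ j < len), then the cur/last/curwid loop over indices 1..len-1 as a fold
-- over the tail with the same state (last, curwid, widlist).
def seek_code (vec : List Int) : List Int :=
  let vec1 := match pvFindPosA vec 0 with
    | some j => vec.drop j
    | none => vec
  let vec2 := match pvFindPosDownA vec1 (vec1.length - 1) with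
    | some j => vec1.take j
    | none => vec1
  let st := vec2.tail.foldl
    (fun (st : Int × Int × List Int) cur =>
      if cur = st.1 then (cur, st.2.1 + 1, st.2.2) else (cur, 1, st.2.2 ++ [st.2.1]))
    (vec2.headI, 1, ([] : List Int))
  st.2.2

-- ===== PORT B =====
def seek_code_alt (vec : List Int) : List Int :=
  let start := (vec.findIdx? (fun x => decide (0 < x))).getD 0
  let v1 := vec.drop start
  let pos := (List.range' 1 (v1.length - 1)).filter (fun j => decide (0 < v1.getD j 0))
  let v2 := match pos.getLast? with
    | some j => v1.take j
    | none => v1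
  let cuts := (List.range' 1 (v2.length - 1)).filter
    (fun j => decide (v2.getD j 0 ≠ v2.getD (j - 1) 0))
  ((0 :: cuts).zip cuts).map (fun p => (p.2 : Int) - (p.1 : Int))

-- ===== PRECONDITION & SPEC =====
-- Pre_ excludes only the empty vector, on which Python A raises IndexError (vec[0]).
def Pre_seek_code (vec : List Int) : Prop := vec ≠ []
instance (vec : List Int) : Decidable (Pre_seek_code vec) := by unfold Pre_seek_code; infer_instance
def pvWitness_seek_code : List Int := [0, 2, 2, 1, 3, 0]

def Spec_seek_code (vec : List Int) (out : List Int) : Prop := out = seek_code_alt vec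
instance (vec : List Int) (out : List Int) : Decidable (Spec_seek_code vec out) := by unfold Spec_seek_code; infer_instance

-- ===== CLAIM (what is proved, stated in full; the proofs are below) =====
def Claim_equal_seek_code : Prop := ∀ (vec : List Int), Dom_seek_code vec → Pre_seek_code vec → Spec_seek_code vec (seek_code vec)

-- ===== LEMMAS AND PROOFS =====

-- run lengths of the RLE of (last-run of width w) ++ rest, last run included
def pvRuns (last w : Int) : List Int → List Int
  | [] => [w]
  | c :: t => if c = last then pvRuns c (w + 1) t else w :: pvRuns c 1 t

-- 0-based change-point positions of last :: t (relative to the head of t)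
def pvCuts0 (last : Int) : List Int → List Nat
  | [] => []
  | c :: t =>
    if c = last then (pvCuts0 c t).map (· + 1)
    else 0 :: (pvCuts0 c t).map (· + 1)

theorem pvRuns_ne_nil (last w : Int) (t : List Int) : pvRuns last w t ≠ [] := by
  induction t generalizing last w with
  | nil => simp [pvRuns]
  | cons c t ih => simp only [pvRuns]; split_ifs <;> simp [ih]

theorem pvFindPosA_eq (vec : List Int) (j : Nat) :
    pvFindPosA vec j = ((vec.drop j).findIdx? (fun x => decide (0 < x))).map (· + j) := by
  by_cases h : j < vec.length
  · rw [pvFindPosA, List.drop_eq_getElem_cons h, List.findIdx?_cons]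
    have hg : vec.getD j 0 = vec[j] := List.getD_eq_getElem vec 0 h
    simp only [dif_pos h, hg]
    by_cases hp : 0 < vec[j]
    · simp [hp]
    · rw [if_neg hp, pvFindPosA_eq vec (j + 1)]
      simp only [hp, decide_false, Bool.false_eq_true, if_false, Option.map_map]
      cases hf : List.findIdx? (fun x => decide (0 < x)) (vec.drop (j + 1)) with
      | none => simp
      | some a => simp; omega
  · rw [pvFindPosA]
    simp [h, List.drop_eq_nil_of_le (Nat.le_of_not_lt h)]
termination_by vec.length - j

theorem pvFindPosDownA_eq (vec : List Int) (j : Nat) :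
    pvFindPosDownA vec j =
      ((List.range' 1 j).filter (fun i => decide (0 < vec.getD i 0))).getLast? := by
  induction j with
  | zero => simp [pvFindPosDownA]
  | succ j ih =>
    rw [pvFindPosDownA]
    simp only [Nat.add_sub_cancel]
    have hr : List.range' 1 (j + 1) = List.range' 1 j ++ [j + 1] := by
      rw [List.range'_concat]
      simp [Nat.add_comm]
    rw [hr, List.filter_append, if_neg (Nat.succ_ne_zero j)]
    by_cases hp : 0 < vec.getD (j + 1) 0
    · rw [if_pos hp]
      have hf : [j + 1].filter (fun i => decide (0 < vec.getD i 0)) = [j + 1] := by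
        rw [List.filter_cons, if_pos (by exact decide_eq_true hp)]
        rfl
      rw [hf, List.getLast?_concat]
    · rw [if_neg hp]
      have hf : [j + 1].filter (fun i => decide (0 < vec.getD i 0)) = [] := by
        rw [List.filter_cons, if_neg (by simpa using hp)]
        rfl
      rw [hf, List.append_nil]
      exact ih

-- the fold of A's RLE loop produces acc ++ (all run lengths except the last)
theorem pvFoldA_eq (t : List Int) (last w : Int) (acc : List Int) :
    (t.foldl
      (fun (st : Int × Int × List Int) cur =>
        if cur = st.1 then (cur, st.2.1 + 1, st.2.2) else (cur, 1, st.2.2 ++ [st.2.1]))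
      (last, w, acc)).2.2 = acc ++ (pvRuns last w t).dropLast := by
  induction t generalizing last w acc with
  | nil => simp [pvRuns]
  | cons c t ih =>
    simp only [List.foldl_cons, pvRuns]
    by_cases h : c = last
    · simp [h, ih]
    · rw [if_neg h, if_neg h, ih,
        List.dropLast_cons_of_ne_nil (pvRuns_ne_nil c 1 t)]
      simp

-- B's change-point filter equals the recursive change-point list, shifted by one
theorem pvCutsFilter_eq (t : List Int) (a : Int) :
    (List.range' 1 t.length).filter
        (fun j => decide ((a :: t).getD j 0 ≠ (a :: t).getD (j - 1) 0)) =
      (pvCuts0 a t).map (· + 1) := by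
  induction t generalizing a with
  | nil => simp [pvCuts0]
  | cons c t ih =>
    have hr : List.range' 1 (c :: t).length = 1 :: List.range' 2 t.length := by
      simp [List.range'_succ]
    have hshift : List.range' 2 t.length = (List.range' 1 t.length).map (fun x => x + 1) := by
      have h1 : (List.range' 1 t.length).map (fun x => 1 + x) = List.range' 2 t.length :=
        List.map_add_range' (a := 1) 1 t.length 1
      rw [← h1]
      exact List.map_congr_left (fun x _ => Nat.add_comm 1 x)
    rw [hr, List.filter_cons, hshift, List.filter_map]
    have hcongr : (List.range' 1 t.length).filter
        ((fun j => decide ((a :: c :: t).getD j 0 ≠ (a :: c :: t).getD (j - 1) 0)) ∘ (fun x => x + 1)) =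
        (List.range' 1 t.length).filter
          (fun j => decide ((c :: t).getD j 0 ≠ (c :: t).getD (j - 1) 0)) := by
      apply List.filter_congr
      intro j hj
      have h1 : 1 ≤ j := by
        rcases List.mem_range'.mp hj with ⟨i, hi, rfl⟩
        omega
      obtain ⟨i, rfl⟩ : ∃ i, j = i + 1 := ⟨j - 1, by omega⟩
      simp [Function.comp]
    rw [hcongr, ih c]
    by_cases h : c = a
    · simp [pvCuts0, h]
    · simp [pvCuts0, h]

-- gap differences are invariant under a common shift of all positions
theorem pvShiftDiff (l : List Nat) (x s : Nat) :
    ((((x + s) :: l.map (· + s)).zip (l.map (· + s))).map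
        (fun p => (p.2 : Int) - (p.1 : Int))) =
      (((x :: l).zip l).map (fun p => (p.2 : Int) - (p.1 : Int))) := by
  induction l generalizing x with
  | nil => rfl
  | cons y l ih =>
    simp only [List.map_cons, List.zip_cons_cons, List.map_cons]
    rw [ih y]
    congr 1
    push_cast
    ring

-- the gap differences of 0 :: shifted change points are the run lengths minus the last
theorem pvZipDiff_eq (t : List Int) (a : Int) (w : Nat) :
    (((0 :: (pvCuts0 a t).map (· + w)).zip ((pvCuts0 a t).map (· + w))).map
        (fun p => (p.2 : Int) - (p.1 : Int))) =
      (pvRuns a (w : Int) t).dropLast := by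
  induction t generalizing a w with
  | nil => simp [pvCuts0, pvRuns]
  | cons c t ih =>
    by_cases h : c = a
    · have hm : (pvCuts0 a (c :: t)).map (· + w) = (pvCuts0 c t).map (· + (w + 1)) := by
        simp only [pvCuts0, if_pos h, List.map_map]
        apply List.map_congr_left; intro x _; simp [Function.comp]; omega
      rw [hm]
      have := ih c (w + 1)
      rw [pvRuns, if_pos h]
      simpa [Nat.cast_add] using this
    · have hm : (pvCuts0 a (c :: t)).map (· + w) =
          (0 + w) :: ((pvCuts0 c t).map (· + 1)).map (· + w) := by
        simp [pvCuts0, if_neg h]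
      rw [hm, pvRuns, if_neg h,
        List.dropLast_cons_of_ne_nil (pvRuns_ne_nil c 1 t)]
      simp only [List.zip_cons_cons, List.map_cons]
      rw [pvShiftDiff ((pvCuts0 c t).map (· + 1)) 0 w]
      have := ih c 1
      simp only [Nat.cast_one] at this
      rw [this]
      congr 1
      push_cast
      ring

-- main equality, total on List Int (both ports return [] on [])
theorem pv_main (vec : List Int) : seek_code vec = seek_code_alt vec := by
  unfold seek_code seek_code_alt
  rw [pvFindPosA_eq vec 0]
  simp only [List.drop_zero]
  -- the two leading trims agree
  have h1 : (match (vec.findIdx? (fun x => decide (0 < x))).map (· + 0) with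
      | some j => vec.drop j
      | none => vec) =
      vec.drop ((vec.findIdx? (fun x => decide (0 < x))).getD 0) := by
    cases h : vec.findIdx? (fun x => decide (0 < x)) <;> simp
  rw [h1]
  set v1 := vec.drop ((vec.findIdx? (fun x => decide (0 < x))).getD 0) with hv1
  rw [pvFindPosDownA_eq v1 (v1.length - 1)]
  set v2 := (match ((List.range' 1 (v1.length - 1)).filter
      (fun i => decide (0 < v1.getD i 0))).getLast? with
    | some j => v1.take j
    | none => v1) with hv2
  clear_value v2
  cases v2 with
  | nil => simp
  | cons hd t =>
    simp only [List.tail_cons, List.headI_cons, List.length_cons,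
      Nat.add_sub_cancel]
    rw [pvFoldA_eq t hd 1 [], List.nil_append,
      pvCutsFilter_eq t hd]
    have := pvZipDiff_eq t hd 1
    simpa using this.symm

-- ===== VERDICT (by name: the statement is the Claim_ definition above) =====
theorem seek_code_spec : Claim_equal_seek_code := by
  intro vec _ _
  unfold Spec_seek_code
  exact pv_main vec
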